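-- pv_equiv track=rewrite | github.com/Advika1030/AI-prj | miniprj.py | create_substring_combinations
-- ===== SOURCE A (Python) =====
-- def create_substring_combinations(substrings, overlap=2):
--     combined_strings = []
--
--
--     def add_combinations(current, index):
--         if index == len(substrings):
--             combined_strings.append(current)
--             return
--
--         for i in range(overlap, len(substrings[index]) + 1):
--             add_combinations(current + substrings[index][:i], index + 1)
--
--
--     add_combinations("", 0)
--     return combined_strings
-- ===== SOURCE B (Python) =====
-- from itertools import product
--
--
-- def create_substring_combinations(substrings, overlap=2):
--     # Precompute, per substring, the list of prefixes it contributes,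
--     # then take the cartesian product of those lists in order.
--     options = [[s[:i] for i in range(overlap, len(s) + 1)] for s in substrings]
--     return [''.join(parts) for parts in product(*options)]
-- ===== Notes on version B (the rewrite author's own statement) =====
-- stated objective: idiomatic
-- what changed: Replaced the recursive DFS with a mutable accumulator by a precomputed per-substring prefix table and a flat itertools.product pass joined into strings.
import Mathlib
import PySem

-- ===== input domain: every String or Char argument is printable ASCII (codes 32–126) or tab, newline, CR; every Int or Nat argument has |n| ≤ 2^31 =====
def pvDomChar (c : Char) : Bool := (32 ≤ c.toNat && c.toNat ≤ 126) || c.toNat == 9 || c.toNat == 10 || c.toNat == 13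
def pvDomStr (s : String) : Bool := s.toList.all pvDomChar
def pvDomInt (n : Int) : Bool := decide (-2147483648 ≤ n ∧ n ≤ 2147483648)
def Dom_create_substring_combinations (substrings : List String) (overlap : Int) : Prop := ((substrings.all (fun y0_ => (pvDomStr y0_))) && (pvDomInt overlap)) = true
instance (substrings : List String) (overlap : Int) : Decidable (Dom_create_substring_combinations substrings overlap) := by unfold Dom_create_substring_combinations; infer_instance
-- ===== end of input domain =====

-- B replaces A's recursive DFS by a per-substring prefix table folded as a cartesian product (idiomatic; same cost).


-- ===== PORT A =====
-- Port of A's recursive DFS add_combinations over the remaining substrings (as char lists).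
def pvAddComb (overlap : Int) (current : List Char) : List (List Char) → List (List Char)
  | [] => [current]
  | s :: rest =>
      (PySem.List.pyRange overlap ((s.length : Int) + 1) 1).flatMap
        (fun i => pvAddComb overlap (current ++ PySem.List.slice s none (some i)) rest)

def create_substring_combinations (substrings : List String) (overlap : Int) : List String :=
  (pvAddComb overlap [] (substrings.map String.toList)).map String.ofList

-- ===== PORT B =====
-- Port of B: per-substring prefix table, then itertools.product as a left fold.
def pvProdStep (acc : List (List Char)) (opts : List (List Char)) : List (List Char) :=
  acc.flatMap (fun c => opts.map (fun o => c ++ o))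

def pvPrefixes (overlap : Int) (s : List Char) : List (List Char) :=
  (PySem.List.pyRange overlap ((s.length : Int) + 1) 1).map
    (fun i => PySem.List.slice s none (some i))

def create_substring_combinations_alt (substrings : List String) (overlap : Int) : List String :=
  (((substrings.map String.toList).map (pvPrefixes overlap)).foldl pvProdStep [[]]).map
    String.ofList

-- ===== PRECONDITION & SPEC =====
def Spec_create_substring_combinations (substrings : List String) (overlap : Int) (out : List String) : Prop := out = create_substring_combinations_alt substrings overlap
instance (substrings : List String) (overlap : Int) (out : List String) : Decidable (Spec_create_substring_combinations substrings overlap out) := by unfold Spec_create_substring_combinations; infer_instance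

-- ===== CLAIM (what is proved, stated in full; the proofs are below) =====
def Claim_equal_create_substring_combinations : Prop := ∀ (substrings : List String) (overlap : Int), Dom_create_substring_combinations substrings overlap → Spec_create_substring_combinations substrings overlap (create_substring_combinations substrings overlap)

-- ===== LEMMAS AND PROOFS =====

lemma foldl_prodStep_eq (overlap : Int) (rest : List (List Char))
    (acc : List (List Char)) :
    (rest.map (pvPrefixes overlap)).foldl pvProdStep acc
      = acc.flatMap (fun c => pvAddComb overlap c rest) := by
  induction rest generalizing acc with
  | nil => simp [pvAddComb]
  | cons s rest ih =>
      simp only [List.map_cons, List.foldl_cons, ih, pvProdStep, pvAddComb, pvPrefixes,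
        List.flatMap_assoc, List.flatMap_map, List.map_map, Function.comp]

-- ===== VERDICT (by name: the statement is the Claim_ definition above) =====
theorem create_substring_combinations_spec : Claim_equal_create_substring_combinations := by
  intro substrings overlap _
  unfold Spec_create_substring_combinations
  have h := foldl_prodStep_eq overlap (substrings.map String.toList) [[]]
  simp only [List.map_map] at h
  simp [create_substring_combinations, create_substring_combinations_alt, h]
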